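-- pv_equiv track=rewrite | github.com/shashkarve/HackerRankTests | src/Encryption.py | _obtain_encoded_str
-- ===== SOURCE A (Python) =====
-- def _obtain_encoded_str(s_list, row, col):
--     result_lst = []
--     for i in range(0, col ):
--         result = ""
--         for j in range(0, row ):
--             if len(s_list[j]) -1 >= i:
--                 result += s_list[j][i]
--         result_lst.append(result)
--     return ' '.join(result_lst)
-- ===== SOURCE B (Python) =====
-- def _obtain_encoded_str(s_list, row, col):
--     result_lst = [''] * col
--     for j in range(row):
--         s = s_list[j]
--         for i in range(min(len(s), col)):
--             result_lst[i] += s[i]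
--     return ' '.join(result_lst)
-- ===== Notes on version B (the rewrite author's own statement) =====
-- stated objective: faster
-- what changed: B pre-allocates one accumulator per column and scatters each row's characters into them in a single row-major pass (cost proportional to the characters actually present), instead of A's re-scanning the whole row list once per column.
-- outside the precondition, e.g. on _obtain_encoded_str(['ab'], 3, 0): A returns '', B raises IndexError
import Mathlib
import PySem

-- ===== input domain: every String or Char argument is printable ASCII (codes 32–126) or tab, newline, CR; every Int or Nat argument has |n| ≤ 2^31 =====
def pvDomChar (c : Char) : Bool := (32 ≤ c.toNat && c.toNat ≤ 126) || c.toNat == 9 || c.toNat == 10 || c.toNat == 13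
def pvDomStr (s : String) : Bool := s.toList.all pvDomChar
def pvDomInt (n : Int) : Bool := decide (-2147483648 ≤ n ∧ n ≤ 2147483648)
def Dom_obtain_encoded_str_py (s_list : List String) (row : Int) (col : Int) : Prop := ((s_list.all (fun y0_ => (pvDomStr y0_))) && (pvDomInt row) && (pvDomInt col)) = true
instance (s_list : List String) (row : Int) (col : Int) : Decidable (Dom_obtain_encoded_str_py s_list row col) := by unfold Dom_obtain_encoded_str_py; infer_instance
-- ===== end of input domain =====

-- B builds all column strings in one row-major pass (scattering each row's characters into
-- pre-allocated column accumulators) instead of A's per-column re-scan of the whole row list.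

-- ===== PORT A =====
def obtain_encoded_str_py (s_list : List String) (row : Int) (col : Int) : String :=
  let result_lst : List String :=
    (PySem.List.pyRange 0 col 1).foldl (fun result_lst i =>
      let result : List Char :=
        (PySem.List.pyRange 0 row 1).foldl (fun result j =>
          let s := PySem.List.pyGetD s_list j ""
          if PySem.Str.len s - 1 ≥ i then
            result ++ (PySem.Str.pyGet? s i).toList
          else result) []
      result_lst ++ [String.ofList result]) []
  PySem.Str.join " " result_lst

-- ===== PORT B =====
def obtain_encoded_str_py_alt (s_list : List String) (row : Int) (col : Int) : String :=
  let init : List (List Char) := List.replicate col.toNat []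
  let arr : List (List Char) :=
    (PySem.List.pyRange 0 row 1).foldl (fun arr j =>
      let s := (PySem.List.pyGetD s_list j "").toList
      (PySem.List.pyRange 0 (min (s.length : Int) col) 1).foldl
        (fun arr i => arr.modify i.toNat (fun cs => cs ++ (PySem.List.pyGet? s i).toList)) arr) init
  PySem.Str.join " " (arr.map String.ofList)

-- ===== PRECONDITION & SPEC =====
-- Pre_ excludes row > len(s_list): there Python B always raises IndexError (its row loop indexes
-- every j < row), while Python A raises too unless col ≤ 0, where A returns '' (degenerate corner).
def Pre_obtain_encoded_str_py (s_list : List String) (row : Int) (col : Int) : Prop :=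
  row ≤ (s_list.length : Int)
instance (s_list : List String) (row : Int) (col : Int) : Decidable (Pre_obtain_encoded_str_py s_list row col) := by unfold Pre_obtain_encoded_str_py; infer_instance
def pvWitness_obtain_encoded_str_py : List String × Int × Int := (["abc", "de", "f"], 3, 4)

def Spec_obtain_encoded_str_py (s_list : List String) (row : Int) (col : Int) (out : String) : Prop := out = obtain_encoded_str_py_alt s_list row col
instance (s_list : List String) (row : Int) (col : Int) (out : String) : Decidable (Spec_obtain_encoded_str_py s_list row col out) := by unfold Spec_obtain_encoded_str_py; infer_instance

-- ===== CLAIM (what is proved, stated in full; the proofs are below) =====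
def Claim_equal_obtain_encoded_str_py : Prop := ∀ (s_list : List String) (row : Int) (col : Int), Dom_obtain_encoded_str_py s_list row col → Pre_obtain_encoded_str_py s_list row col → Spec_obtain_encoded_str_py s_list row col (obtain_encoded_str_py s_list row col)

-- ===== LEMMAS AND PROOFS =====

-- the per-column contribution both programs compute
def pvContrib (s_list : List String) (col : Int) (js : List Int) (k : Nat) : List Char :=
  js.flatMap (fun j =>
    if (k : Int) < min (((PySem.List.pyGetD s_list j "").toList.length : Int)) col
    then (PySem.List.pyGet? (PySem.List.pyGetD s_list j "").toList (k : Int)).toList else [])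

-- Nat-range scatter: effect on one cell
lemma scatter_range_get (g : Nat → List Char) (n : Nat) (arr : List (List Char)) (k : Nat) :
    ((List.range n).foldl (fun a i => a.modify i (fun cs => cs ++ g i)) arr)[k]?
      = if k < n then arr[k]?.map (fun cs => cs ++ g k) else arr[k]? := by
  induction n generalizing arr with
  | zero => simp
  | succ n ih =>
    rw [List.range_succ, List.foldl_append]
    simp only [List.foldl_cons, List.foldl_nil]
    rw [List.getElem?_modify, ih]
    rcases lt_trichotomy k n with h | h | h
    · simp [h, Nat.lt_succ_of_lt h, Nat.ne_of_gt h]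
    · subst h; simp [Nat.lt_irrefl, Nat.lt_succ_self]
    · simp [Nat.not_lt.mpr (Nat.le_of_lt h), Nat.not_lt.mpr (Nat.succ_le_of_lt h), Nat.ne_of_lt h]

-- Int pyRange scatter, reduced to the Nat form
lemma scatter_pyRange_get (g : Int → List Char) (m : Int) (arr : List (List Char)) (k : Nat) :
    ((PySem.List.pyRange 0 m 1).foldl (fun a i => a.modify i.toNat (fun cs => cs ++ g i)) arr)[k]?
      = if (k : Int) < m then arr[k]?.map (fun cs => cs ++ g (k : Int)) else arr[k]? := by
  rw [PySem.List.pyRange_one]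
  simp only [zero_add, Int.sub_zero, List.foldl_map, Int.toNat_natCast]
  rw [scatter_range_get (fun i => g (i : Int)) m.toNat arr k]
  by_cases h : (k : Int) < m
  · rw [if_pos h, if_pos (by omega)]
  · rw [if_neg h, if_neg (by omega)]

-- outer row loop of B: effect on one cell
lemma outer_fold_get (s_list : List String) (col : Int) (js : List Int) (arr : List (List Char)) (k : Nat) :
    (js.foldl (fun arr j =>
        (PySem.List.pyRange 0 (min (((PySem.List.pyGetD s_list j "").toList.length : Int)) col) 1).foldl
          (fun arr i => arr.modify i.toNat
            (fun cs => cs ++ (PySem.List.pyGet? (PySem.List.pyGetD s_list j "").toList i).toList)) arr) arr)[k]?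
      = arr[k]?.map (fun cs => cs ++ pvContrib s_list col js k) := by
  induction js generalizing arr with
  | nil => rw [List.foldl_nil]; cases arr[k]? <;> simp [pvContrib]
  | cons j js ih =>
    rw [List.foldl_cons, ih, scatter_pyRange_get]
    unfold pvContrib
    rw [List.flatMap_cons]
    by_cases h : (k : Int) < min (((PySem.List.pyGetD s_list j "").toList.length : Int)) col
    · rw [if_pos h, if_pos h]
      cases arr[k]? <;> simp [List.append_assoc]
    · rw [if_neg h, if_neg h]
      cases arr[k]? <;> simp

-- A's inner loop builds exactly the contribution (when the column index is < col)
lemma colA_eq_contrib (s_list : List String) (row col : Int) (k : Nat) (hk : (k : Int) < col) :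
    (PySem.List.pyRange 0 row 1).foldl (fun result j =>
        let s := PySem.List.pyGetD s_list j ""
        if PySem.Str.len s - 1 ≥ (k : Int) then
          result ++ (PySem.Str.pyGet? s (k : Int)).toList
        else result) []
      = pvContrib s_list col (PySem.List.pyRange 0 row 1) k := by
  unfold pvContrib
  rw [PySem.List.foldl_congr_mem
    (g := fun result j =>
      result ++ (if (k : Int) < min (((PySem.List.pyGetD s_list j "").toList.length : Int)) col
        then (PySem.List.pyGet? (PySem.List.pyGetD s_list j "").toList (k : Int)).toList else []))]
  · rw [PySem.List.foldl_append_eq_flatMap, List.nil_append]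
  · intro acc j _
    simp only [PySem.Str.len_eq]
    by_cases h : ((PySem.List.pyGetD s_list j "").toList.length : Int) - 1 ≥ (k : Int)
    · rw [if_pos h, if_pos (by omega)]
      simp [PySem.Str.pyGet?]
    · rw [if_neg h, if_neg (by omega), List.append_nil]

-- ===== VERDICT (by name: the statement is the Claim_ definition above) =====
theorem obtain_encoded_str_py_spec : Claim_equal_obtain_encoded_str_py := by
  intro s_list row col _ _
  unfold Spec_obtain_encoded_str_py obtain_encoded_str_py obtain_encoded_str_py_alt
  simp only []
  congr 1
  rw [PySem.List.foldl_append_singleton_eq_map]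
  apply List.ext_getElem?
  intro k
  rw [List.nil_append, List.getElem?_map, List.getElem?_map, outer_fold_get]
  by_cases hk : k < col.toNat
  · have h1 : ((PySem.List.pyRange 0 col 1))[k]? = some ((k : Int)) := by
      rw [List.getElem?_eq_getElem (by rw [PySem.List.length_pyRange_one]; omega)]
      rw [PySem.List.getElem_pyRange_one]; simp
    have h2 : (List.replicate col.toNat ([] : List Char))[k]? = some [] := by
      rw [List.getElem?_replicate, if_pos hk]
    rw [h1, h2]
    simp only [Option.map_some, List.nil_append]
    rw [colA_eq_contrib s_list row col k (by omega)]
  · have h1 : ((PySem.List.pyRange 0 col 1))[k]? = none := by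
      rw [List.getElem?_eq_none]
      rw [PySem.List.length_pyRange_one]; omega
    have h2 : (List.replicate col.toNat ([] : List Char))[k]? = none := by
      rw [List.getElem?_eq_none]; simpa using hk
    rw [h1, h2]; rfl
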